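-- pv_equiv track=rewrite | github.com/reichlab/forecast-repository | forecast_app/models/forecast.py | _read_csv_file_rows
-- ===== SOURCE A (Python) =====
-- def _read_csv_file_rows(csv_reader, exp_num_rows):
--     """
--     Loads the rows from cdc_csv_file_fp, cleans them, and then returns them as a list. Validates exp_num_rows, but
--     does not check locations and targets. This is b/c Locations and Targets might not yet exist (if they're
--     dynamically created by this method's callers).
--
--     :return: a 3-tuple: (location_names, target_names, rows) where the first two are sets and the last is a list of
--         rows: location_name, target_name, parsed_value]
--     """
--     locations = set()
--     targets = set()
--     rows = []
--     for row in csv_reader: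
--         if len(row) != exp_num_rows:
--             raise RuntimeError(f"Invalid row (wasn't {exp_num_rows} columns): {row!r}")
--
--         location_name, target_name = row[0], row[1]
--         locations.add(location_name)
--         targets.add(target_name)
--         rows.append(row)
--     return locations, targets, rows
-- ===== SOURCE B (Python) =====
-- def _read_csv_file_rows(csv_reader, exp_num_rows):
--     # Column-wise strategy: validate lengths, then transpose the table with zip(*rows)
--     # and read the name sets off the first two columns.
--     rows = list(csv_reader)
--     for row in rows:
--         if len(row) != exp_num_rows:
--             raise RuntimeError(f"Invalid row (wasn't {exp_num_rows} columns): {row!r}")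
--     columns = list(zip(*rows))
--     locations = set(columns[0]) if columns else set()
--     targets = set(columns[1]) if columns else set()
--     return locations, targets, rows
-- ===== Notes on version B (the rewrite author's own statement) =====
-- stated objective: alternative
-- what changed: Replaces A's single row-wise loop maintaining two growing sets and a list by a column-wise strategy: validate, transpose the table with zip(*rows), and build each name set directly from its column.
import Mathlib
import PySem

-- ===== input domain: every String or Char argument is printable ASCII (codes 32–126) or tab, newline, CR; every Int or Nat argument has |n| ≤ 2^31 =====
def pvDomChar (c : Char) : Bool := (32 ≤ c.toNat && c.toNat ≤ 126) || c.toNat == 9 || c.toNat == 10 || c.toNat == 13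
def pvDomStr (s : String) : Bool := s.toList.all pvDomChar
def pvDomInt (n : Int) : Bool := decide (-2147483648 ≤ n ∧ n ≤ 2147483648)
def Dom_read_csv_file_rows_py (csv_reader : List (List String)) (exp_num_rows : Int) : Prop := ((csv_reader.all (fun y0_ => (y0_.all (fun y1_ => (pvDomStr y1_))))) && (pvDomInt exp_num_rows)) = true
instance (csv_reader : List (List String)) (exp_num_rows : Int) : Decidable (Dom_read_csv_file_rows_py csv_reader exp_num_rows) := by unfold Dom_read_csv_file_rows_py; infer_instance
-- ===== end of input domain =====

-- B replaces A's single row-wise loop by a column-wise strategy (validate, transpose with zip(*rows), read the name sets off the first two columns); same return value.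


-- ===== PORT A =====
-- Fused single pass: one fold over csv_reader carrying (locations, targets, rows).
-- row[0] / row[1] via pyGetD (total form): exact under Pre_, which guarantees the indices are in range.
def read_csv_file_rows_py (csv_reader : List (List String)) (exp_num_rows : Int) : List String × List String × List (List String) :=
  let _ := exp_num_rows
  csv_reader.foldl
    (fun (st : PySem.Set String × PySem.Set String × List (List String)) row =>
      let location_name := PySem.List.pyGetD row 0 ""
      let target_name := PySem.List.pyGetD row 1 ""
      (PySem.Set.add st.1 location_name, PySem.Set.add st.2.1 target_name, st.2.2 ++ [row]))
    (PySem.Set.empty, PySem.Set.empty, [])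

-- ===== PORT B =====
-- zip(*rows): the transposed table, truncated to the shortest row (Python's zip).
def pyMinLen (rows : List (List String)) : Nat :=
  match rows with
  | [] => 0
  | [r] => r.length
  | r :: r' :: rs => min r.length (pyMinLen (r' :: rs))

def pyZipStar (rows : List (List String)) : List (List String) :=
  (List.range (pyMinLen rows)).map (fun k => rows.map (fun r => r.getD k ""))

-- Column-wise: transpose, then each name set is set(column); columns[k] in range under Pre_.
def read_csv_file_rows_py_alt (csv_reader : List (List String)) (exp_num_rows : Int) : List String × List String × List (List String) :=
  let _ := exp_num_rows
  let rows := csv_reader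
  let columns := pyZipStar rows
  let locations := if columns.isEmpty then PySem.Set.empty else PySem.Set.ofList (PySem.List.pyGetD columns 0 [])
  let targets := if columns.isEmpty then PySem.Set.empty else PySem.Set.ofList (PySem.List.pyGetD columns 1 [])
  (locations, targets, rows)

-- ===== PRECONDITION & SPEC =====
-- Pre_ excludes exactly the inputs where Python A raises: a row whose length differs from
-- exp_num_rows (RuntimeError), or a nonempty reader with exp_num_rows < 2 (row[1] IndexError).
def Pre_read_csv_file_rows_py (csv_reader : List (List String)) (exp_num_rows : Int) : Prop :=
  (∀ row ∈ csv_reader, (row.length : Int) = exp_num_rows) ∧ (csv_reader = [] ∨ 2 ≤ exp_num_rows)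
instance (csv_reader : List (List String)) (exp_num_rows : Int) : Decidable (Pre_read_csv_file_rows_py csv_reader exp_num_rows) := by unfold Pre_read_csv_file_rows_py; infer_instance
def pvWitness_read_csv_file_rows_py : List (List String) × Int := ([["US", "1 wk ahead"], ["FR", "1 wk ahead"]], 2)

def Spec_read_csv_file_rows_py (csv_reader : List (List String)) (exp_num_rows : Int) (out : List String × List String × List (List String)) : Prop := out = read_csv_file_rows_py_alt csv_reader exp_num_rows
instance (csv_reader : List (List String)) (exp_num_rows : Int) (out : List String × List String × List (List String)) : Decidable (Spec_read_csv_file_rows_py csv_reader exp_num_rows out) := by unfold Spec_read_csv_file_rows_py; infer_instance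

-- ===== CLAIM =====
def Claim_equal_read_csv_file_rows_py : Prop := ∀ (csv_reader : List (List String)) (exp_num_rows : Int), Dom_read_csv_file_rows_py csv_reader exp_num_rows → Pre_read_csv_file_rows_py csv_reader exp_num_rows → Spec_read_csv_file_rows_py csv_reader exp_num_rows (read_csv_file_rows_py csv_reader exp_num_rows)

-- ===== LEMMAS AND PROOFS =====
-- A's fold from any start state: updates the two sets with the first/second columns, appends the rows.
lemma read_csv_fold_inv (xs : List (List String)) (l t : PySem.Set String) (acc : List (List String)) :
    xs.foldl
      (fun (st : PySem.Set String × PySem.Set String × List (List String)) row =>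
        (PySem.Set.add st.1 (PySem.List.pyGetD row 0 ""), PySem.Set.add st.2.1 (PySem.List.pyGetD row 1 ""), st.2.2 ++ [row]))
      (l, t, acc)
    = (PySem.Set.update l (xs.map (fun row => PySem.List.pyGetD row 0 "")),
       PySem.Set.update t (xs.map (fun row => PySem.List.pyGetD row 1 "")),
       acc ++ xs) := by
  induction xs generalizing l t acc with
  | nil => simp [PySem.Set.update]
  | cons r rs ih => simp [List.foldl, ih, PySem.Set.update]

-- All rows have length n → the shortest row has length n.
lemma pyMinLen_const (xs : List (List String)) (n : Nat) (h : ∀ r ∈ xs, r.length = n) (hne : xs ≠ []) :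
    pyMinLen xs = n := by
  induction xs with
  | nil => simp at hne
  | cons r rs ih =>
    cases rs with
    | nil => simpa [pyMinLen] using h r (by simp)
    | cons r' rs' =>
      have h1 : r.length = n := h r (by simp)
      have h2 : pyMinLen (r' :: rs') = n := ih (fun x hx => h x (by simp [hx])) (by simp)
      simp [pyMinLen, h1, h2]

-- ===== VERDICT =====
theorem read_csv_file_rows_py_spec : Claim_equal_read_csv_file_rows_py := by
  intro csv_reader exp_num_rows _ hpre
  obtain ⟨hlen, hor⟩ := hpre
  unfold Spec_read_csv_file_rows_py read_csv_file_rows_py read_csv_file_rows_py_alt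
  cases csv_reader with
  | nil => simp [pyZipStar, pyMinLen, PySem.Set.empty]
  | cons r rs =>
    have hexp : 2 ≤ exp_num_rows := by
      rcases hor with h | h
      · exact absurd h (by simp)
      · exact h
    have hn : ∀ row ∈ (r :: rs), row.length = exp_num_rows.toNat := by
      intro row hrow
      have := hlen row hrow
      omega
    have hmin : pyMinLen (r :: rs) = exp_num_rows.toNat := pyMinLen_const _ _ hn (by simp)
    have h2 : 2 ≤ exp_num_rows.toNat := by omega
    have hcols : pyZipStar (r :: rs) =
        (List.range exp_num_rows.toNat).map (fun k => (r :: rs).map (fun row => row.getD k "")) := by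
      simp [pyZipStar, hmin]
    have hne : ¬ (pyZipStar (r :: rs)).isEmpty := by
      simp [hcols, List.isEmpty_iff]
      omega
    have hget : ∀ k : Nat, k < exp_num_rows.toNat →
        PySem.List.pyGetD (pyZipStar (r :: rs)) (k : Int) [] = (r :: rs).map (fun row => row.getD k "") := by
      intro k hk
      rw [hcols, PySem.List.pyGetD_natCast]
      rw [List.getD_eq_getElem]
      · simp
      · simpa using hk
    have m0 : (r :: rs).map (fun row => PySem.List.pyGetD row 0 "") = (r :: rs).map (fun row => row.getD 0 "") := by
      apply List.map_congr_left; intro row _; simp [pysem]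
    have m1 : (r :: rs).map (fun row => PySem.List.pyGetD row 1 "") = (r :: rs).map (fun row => row.getD 1 "") := by
      apply List.map_congr_left; intro row _; simp [pysem]
    rw [read_csv_fold_inv]
    have g0 := hget 0 (by omega)
    have g1 := hget 1 (by omega)
    push_cast at g0 g1
    have hne' : (pyZipStar (r :: rs)).isEmpty = false := by
      cases h : (pyZipStar (r :: rs)).isEmpty
      · rfl
      · exact absurd h hne
    simp only [hne', Bool.false_eq_true, if_false]
    rw [g0, g1, m0, m1]
    simp [PySem.Set.update, PySem.Set.ofList_eq_foldl, PySem.Set.empty]
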